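-- pv_equiv track=rewrite | github.com/fengjiyuan/cgofed | utils/cifar100.py | set_task
-- ===== SOURCE A (Python) =====
-- def set_task(clients_num, tasks_num, classes_per_task):
--     taskcla_list = []
--     for c_id in range(clients_num):
--         # Others
--         n_cla = classes_per_task
--         taskcla=[]
--         for t in range(tasks_num):
--             taskcla.append((t, n_cla))
--             n_cla += classes_per_task
--         taskcla_list.append(taskcla)
--     return taskcla_list
-- ===== SOURCE B (Python) =====
-- def set_task(clients_num, tasks_num, classes_per_task):
--     # Compute the invariant per-client list once (closed form, no accumulator),
--     # then replicate it per client (copied to avoid aliasing).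
--     if clients_num <= 0:
--         return []
--     inner = [(t, classes_per_task * (t + 1)) for t in range(tasks_num)]
--     return [inner[:] for _ in range(clients_num)]
-- ===== Notes on version B (the rewrite author's own statement) =====
-- stated objective: faster
-- what changed: B computes the invariant inner task list once with a closed-form count classes_per_task*(t+1) (no running accumulator) and replicates it per client, instead of A's nested loop that rebuilds the list with an accumulator for every client.
import Mathlib
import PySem

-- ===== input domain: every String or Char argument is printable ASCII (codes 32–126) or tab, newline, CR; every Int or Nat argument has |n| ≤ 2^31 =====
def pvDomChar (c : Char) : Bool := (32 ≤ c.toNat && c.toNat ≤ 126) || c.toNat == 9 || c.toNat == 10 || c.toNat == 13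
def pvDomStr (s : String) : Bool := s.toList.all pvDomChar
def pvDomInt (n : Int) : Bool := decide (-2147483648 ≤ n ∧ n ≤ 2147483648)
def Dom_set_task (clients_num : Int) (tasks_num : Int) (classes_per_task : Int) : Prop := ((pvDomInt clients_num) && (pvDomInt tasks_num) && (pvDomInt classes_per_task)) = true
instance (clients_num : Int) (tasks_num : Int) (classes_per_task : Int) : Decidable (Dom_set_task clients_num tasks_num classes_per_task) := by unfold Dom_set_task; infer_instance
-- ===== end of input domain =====

-- B computes the invariant inner list once with a closed form and replicates it; objective: faster (constant-factor, no per-client rebuild).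

-- ===== PORT A =====
def set_task (clients_num : Int) (tasks_num : Int) (classes_per_task : Int) : List (List (Int × Int)) :=
  (PySem.List.pyRange 0 clients_num 1).foldl
    (fun taskcla_list _c_id =>
      let inner := (PySem.List.pyRange 0 tasks_num 1).foldl
        (fun (st : List (Int × Int) × Int) t => (st.1 ++ [(t, st.2)], st.2 + classes_per_task))
        ([], classes_per_task)
      taskcla_list ++ [inner.1])
    []

-- ===== PORT B =====
def set_task_alt (clients_num : Int) (tasks_num : Int) (classes_per_task : Int) : List (List (Int × Int)) :=
  if clients_num ≤ 0 then []
  else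
    let inner := (PySem.List.pyRange 0 tasks_num 1).map (fun t => (t, classes_per_task * (t + 1)))
    (PySem.List.pyRange 0 clients_num 1).map (fun _ => inner)

-- ===== PRECONDITION & SPEC =====
def Spec_set_task (clients_num : Int) (tasks_num : Int) (classes_per_task : Int) (out : List (List (Int × Int))) : Prop := out = set_task_alt clients_num tasks_num classes_per_task
instance (clients_num : Int) (tasks_num : Int) (classes_per_task : Int) (out : List (List (Int × Int))) : Decidable (Spec_set_task clients_num tasks_num classes_per_task out) := by unfold Spec_set_task; infer_instance

-- ===== CLAIM (what is proved, stated in full; the proofs are below) =====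
def Claim_equal_set_task : Prop := ∀ (clients_num : Int) (tasks_num : Int) (classes_per_task : Int), Dom_set_task clients_num tasks_num classes_per_task → Spec_set_task clients_num tasks_num classes_per_task (set_task clients_num tasks_num classes_per_task)

-- ===== LEMMAS AND PROOFS =====

-- A's inner accumulator loop over range(n) yields exactly the closed-form list.
theorem pv_inner_fold (k : Int) (n : Nat) :
    ((List.range n).map (fun j : Nat => (0 : Int) + (j : Int))).foldl
      (fun (st : List (Int × Int) × Int) t => (st.1 ++ [(t, st.2)], st.2 + k)) ([], k)
    = ((List.range n).map (fun j : Nat => ((0 : Int) + (j : Int), k + k * (j : Int))), k + k * (n : Int)) := by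
  induction n with
  | zero => simp
  | succ n ih =>
      rw [List.range_succ, List.map_append, List.map_append, List.foldl_append, ih]
      refine Prod.ext ?_ ?_
      · simp
      · rw [List.map_cons, List.map_nil, List.foldl_cons, List.foldl_nil]
        push_cast
        ring

-- Appending a constant element once per loop iteration is a constant map.
theorem pv_const_fold {α β : Type} (v : List β) (xs : List α) (l : List (List β)) :
    xs.foldl (fun acc (_ : α) => acc ++ [v]) l = l ++ xs.map (fun _ => v) := by
  induction xs generalizing l with
  | nil => simp
  | cons x xs ih => simp [ih]

-- ===== VERDICT (by name: the statement is the Claim_ definition above) =====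
theorem set_task_spec : Claim_equal_set_task := by
  intro c t k _
  unfold Spec_set_task set_task set_task_alt
  by_cases hc : c ≤ 0
  · simp [PySem.List.pyRange_one, hc]
  · rw [if_neg hc]
    have hinner : (List.range t.toNat).map (fun j : Nat => ((0 : Int) + (j : Int), k + k * (j : Int)))
        = ((List.range t.toNat).map (fun j : Nat => (0 : Int) + (j : Int))).map
            (fun t' => (t', k * (t' + 1))) := by
      rw [List.map_map]
      refine List.map_congr_left fun j _ => ?_
      simp only [Function.comp_apply, Prod.mk.injEq, true_and]
      ring
    simp only [PySem.List.pyRange_one, Int.sub_zero]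
    rw [pv_inner_fold k t.toNat, pv_const_fold, hinner]
    simp
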